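-- pv_equiv track=rewrite | github.com/klaerik/Advent-of-Code | 2021/day07.py | calc_fuel
-- ===== SOURCE A (Python) =====
-- def calc_fuel(crabs):
--     positions = max(crabs.keys()) + 1
--     left_crabs = 0
--     right_crabs = sum(crabs.values())
--     current_fuel = sum([0 if position == 0 else count * position for position,count in crabs.items()])
--     fuel_usage = [current_fuel]
--     for i in range(positions):
--         left_crabs += crabs.get(i,0)
--         right_crabs -= crabs.get(i,0)
--         current_fuel += left_crabs
--         current_fuel -= right_crabs
--         fuel_usage.append(current_fuel)
--     return fuel_usage
-- ===== SOURCE B (Python) =====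
-- def calc_fuel(crabs):
--     positions = max(crabs.keys()) + 1
--     total = sum(crabs.values())
--     base = sum(count * pos for pos, count in crabs.items())
--
--     def fuel(t):
--         return base - t * total + 2 * sum(count * (t - pos)
--                                           for pos, count in crabs.items()
--                                           if 0 <= pos < t)
--
--     return [base] + [fuel(t) for t in range(1, positions + 1)]
-- ===== Notes on version B (the rewrite author's own statement) =====
-- stated objective: alternative
-- what changed: Replaces A's incremental stateful loop (left/right crab counters carrying a running fuel delta across consecutive targets) with a per-target closed-form recomputation: fuel(t) = base - t*total + 2*sum(count*(t-pos) for crabs with 0 <= pos < t), obtained by summing the telescoping deltas, so B keeps no loop state at all.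
import Mathlib
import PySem

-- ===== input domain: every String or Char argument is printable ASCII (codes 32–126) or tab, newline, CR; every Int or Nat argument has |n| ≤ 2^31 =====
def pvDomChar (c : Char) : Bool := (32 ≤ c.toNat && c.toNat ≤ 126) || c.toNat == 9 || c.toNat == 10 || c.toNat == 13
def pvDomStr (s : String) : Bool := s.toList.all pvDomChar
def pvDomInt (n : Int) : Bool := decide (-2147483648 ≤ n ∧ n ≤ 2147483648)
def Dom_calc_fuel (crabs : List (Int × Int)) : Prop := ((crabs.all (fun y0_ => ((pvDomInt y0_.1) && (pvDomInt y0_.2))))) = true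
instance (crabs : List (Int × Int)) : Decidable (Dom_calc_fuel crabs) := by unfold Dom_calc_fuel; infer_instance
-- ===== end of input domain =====

-- B replaces A's incremental left/right running-update loop by a per-target
-- closed-form recomputation (alternative algorithm; not faster).

-- ===== PORT A =====
-- loop body of A's 'for i in range(positions)', state = (left_crabs, right_crabs, current_fuel, fuel_usage)
def pvStepA (crabs : List (Int × Int)) (st : Int × Int × Int × List Int) (i : Int) :
    Int × Int × Int × List Int :=
  let left := st.1 + PySem.Dict.getD (PySem.Dict.mk crabs) i 0
  let right := st.2.1 - PySem.Dict.getD (PySem.Dict.mk crabs) i 0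
  let cur := st.2.2.1 + left - right
  (left, right, cur, st.2.2.2 ++ [cur])

def calc_fuel (crabs : List (Int × Int)) : List Int :=
  match PySem.List.max? (crabs.map Prod.fst) (fun y => y) with
  | none => []  -- max() on an empty dict raises ValueError; excluded by Pre_
  | some mx =>
    let positions : Int := mx + 1
    let rightCrabs : Int := (crabs.map Prod.snd).sum
    let currentFuel : Int :=
      (crabs.map (fun pc => if pc.1 = 0 then 0 else pc.2 * pc.1)).sum
    let st := (PySem.List.pyRange 0 positions 1).foldl (pvStepA crabs)
      (0, rightCrabs, currentFuel, [currentFuel])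
    st.2.2.2

-- ===== PORT B =====
-- fuel(t) of Source B
def pvFuelB (crabs : List (Int × Int)) (base total t : Int) : Int :=
  base - t * total +
    2 * ((crabs.filter (fun pc => decide (0 ≤ pc.1) && decide (pc.1 < t))).map
      (fun pc => pc.2 * (t - pc.1))).sum

def calc_fuel_alt (crabs : List (Int × Int)) : List Int :=
  match PySem.List.max? (crabs.map Prod.fst) (fun y => y) with
  | none => []  -- max() on an empty dict raises ValueError; excluded by Pre_
  | some mx =>
    let positions : Int := mx + 1
    let total : Int := (crabs.map Prod.snd).sum
    let base : Int := (crabs.map (fun pc => pc.2 * pc.1)).sum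
    [base] ++ (PySem.List.pyRange 1 (positions + 1) 1).map (pvFuelB crabs base total)

-- ===== PRECONDITION & SPEC =====
-- Pre_ excludes the empty dict, on which max() raises ValueError (in both A and B), and
-- association lists with duplicate keys, which no Python dict can produce (A's port
-- would read only the first binding via get while summing all of them).
def Pre_calc_fuel (crabs : List (Int × Int)) : Prop :=
  crabs ≠ [] ∧ (crabs.map Prod.fst).Nodup
instance (crabs : List (Int × Int)) : Decidable (Pre_calc_fuel crabs) := by
  unfold Pre_calc_fuel; infer_instance

def pvWitness_calc_fuel : (List (Int × Int)) := [(0, 1), (2, 3)]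

def Spec_calc_fuel (crabs : List (Int × Int)) (out : List Int) : Prop := out = calc_fuel_alt crabs
instance (crabs : List (Int × Int)) (out : List Int) : Decidable (Spec_calc_fuel crabs out) := by unfold Spec_calc_fuel; infer_instance

-- ===== CLAIM (what is proved, stated in full; the proofs are below) =====
def Claim_equal_calc_fuel : Prop := ∀ (crabs : List (Int × Int)), Dom_calc_fuel crabs → Pre_calc_fuel crabs → Spec_calc_fuel crabs (calc_fuel crabs)

-- ===== LEMMAS AND PROOFS =====

-- the count found by crabs.get(k, 0), as a sum (0 when k is not a key)
def pvMsum (crabs : List (Int × Int)) (k : Int) : Int :=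
  (crabs.map (fun pc => if pc.1 = k then pc.2 else 0)).sum
-- total count of crabs with position in [0, k)
def pvLsum (crabs : List (Int × Int)) (k : Int) : Int :=
  (crabs.map (fun pc => if 0 ≤ pc.1 ∧ pc.1 < k then pc.2 else 0)).sum
-- Σ count * (t - pos) over crabs with position in [0, t)
def pvHsum (crabs : List (Int × Int)) (t : Int) : Int :=
  (crabs.map (fun pc => if 0 ≤ pc.1 ∧ pc.1 < t then pc.2 * (t - pc.1) else 0)).sum
-- the closed-form fuel value at target t
def pvG (crabs : List (Int × Int)) (t : Int) : Int :=
  (crabs.map (fun pc => pc.2 * pc.1)).sum - t * (crabs.map Prod.snd).sum + 2 * pvHsum crabs t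

theorem pvMsum_of_not_mem (crabs : List (Int × Int)) (k : Int)
    (h : k ∉ crabs.map Prod.fst) : pvMsum crabs k = 0 := by
  induction crabs with
  | nil => rfl
  | cons pc rest ih =>
    simp only [List.map_cons, List.mem_cons, not_or] at h
    simp only [pvMsum, List.map_cons, List.sum_cons] at *
    rw [if_neg (fun hk => h.1 hk.symm), ih h.2]
    simp

theorem pvGetD_eq_msum (crabs : List (Int × Int)) (k : Int)
    (h : (crabs.map Prod.fst).Nodup) :
    PySem.Dict.getD (PySem.Dict.mk crabs) k 0 = pvMsum crabs k := by
  induction crabs with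
  | nil => rfl
  | cons pc rest ih =>
    obtain ⟨p, c⟩ := pc
    simp only [List.map_cons, List.nodup_cons] at h
    have hsum : pvMsum ((p, c) :: rest) k = (if p = k then c else 0) + pvMsum rest k := by
      simp [pvMsum]
    rw [hsum, PySem.Dict.getD_eq_get?_getD, PySem.Dict.get?_mk_cons]
    by_cases hk : p = k
    · subst hk
      rw [if_pos (by simp), if_pos rfl, pvMsum_of_not_mem rest p h.1]
      simp
    · rw [if_neg (by simpa using hk), if_neg hk, ← PySem.Dict.getD_eq_get?_getD, ih h.2]
      simp

theorem pvLsum_succ (crabs : List (Int × Int)) (k : Int) (hk : 0 ≤ k) :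
    pvLsum crabs (k + 1) = pvLsum crabs k + pvMsum crabs k := by
  induction crabs with
  | nil => rfl
  | cons pc rest ih =>
    simp only [pvLsum, pvMsum, List.map_cons, List.sum_cons] at *
    rw [ih]
    have : (if 0 ≤ pc.1 ∧ pc.1 < k + 1 then pc.2 else 0) =
        (if 0 ≤ pc.1 ∧ pc.1 < k then pc.2 else 0) + (if pc.1 = k then pc.2 else 0) := by
      split_ifs <;> omega
    rw [this]; ring

theorem pvHsum_succ (crabs : List (Int × Int)) (k : Int) (hk : 0 ≤ k) :
    pvHsum crabs (k + 1) = pvHsum crabs k + pvLsum crabs (k + 1) := by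
  induction crabs with
  | nil => rfl
  | cons pc rest ih =>
    simp only [pvHsum, pvLsum, List.map_cons, List.sum_cons] at *
    rw [ih]
    have : (if 0 ≤ pc.1 ∧ pc.1 < k + 1 then pc.2 * (k + 1 - pc.1) else 0) =
        (if 0 ≤ pc.1 ∧ pc.1 < k then pc.2 * (k - pc.1) else 0) +
        (if 0 ≤ pc.1 ∧ pc.1 < k + 1 then pc.2 else 0) := by
      by_cases h1 : 0 ≤ pc.1 ∧ pc.1 < k
      · rw [if_pos h1, if_pos ⟨h1.1, by omega⟩, if_pos ⟨h1.1, by omega⟩]; ring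
      · by_cases h2 : 0 ≤ pc.1 ∧ pc.1 < k + 1
        · have hp : pc.1 = k := by omega
          rw [if_pos h2, if_neg h1, if_pos h2, hp]; ring
        · rw [if_neg h2, if_neg h1, if_neg h2]; ring
    rw [this]; ring

theorem pvHsum_zero (crabs : List (Int × Int)) : pvHsum crabs 0 = 0 := by
  induction crabs with
  | nil => rfl
  | cons pc rest ih =>
    simp only [pvHsum, List.map_cons, List.sum_cons] at *
    rw [ih, if_neg (by omega)]
    simp

theorem pvLsum_zero (crabs : List (Int × Int)) : pvLsum crabs 0 = 0 := by
  induction crabs with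
  | nil => rfl
  | cons pc rest ih =>
    simp only [pvLsum, List.map_cons, List.sum_cons] at *
    rw [ih, if_neg (by omega)]
    simp

-- A's base sum: the 'if position == 0' branch is the same as count * position
theorem pvBase_eq (crabs : List (Int × Int)) :
    (crabs.map (fun pc => if pc.1 = 0 then 0 else pc.2 * pc.1)).sum =
    (crabs.map (fun pc => pc.2 * pc.1)).sum := by
  induction crabs with
  | nil => rfl
  | cons pc rest ih =>
    simp only [List.map_cons, List.sum_cons] at *
    rw [ih]
    by_cases h0 : pc.1 = 0
    · rw [if_pos h0, h0]; ring
    · rw [if_neg h0]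

-- B's fuel(t) (filter + map) is pvG t
theorem pvFuelB_eq_G (crabs : List (Int × Int)) (t : Int) :
    pvFuelB crabs ((crabs.map (fun pc => pc.2 * pc.1)).sum) ((crabs.map Prod.snd).sum) t =
    pvG crabs t := by
  unfold pvFuelB pvG
  have : ((crabs.filter (fun pc => decide (0 ≤ pc.1) && decide (pc.1 < t))).map
      (fun pc => pc.2 * (t - pc.1))).sum = pvHsum crabs t := by
    induction crabs with
    | nil => rfl
    | cons pc rest ih =>
      simp only [pvHsum, List.filter_cons, List.map_cons, List.sum_cons] at *
      by_cases h : 0 ≤ pc.1 ∧ pc.1 < t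
      · rw [if_pos (by simpa using h), if_pos h, List.map_cons, List.sum_cons, ih]
      · rw [if_neg (by simpa using h), if_neg h, ih]
        simp
  rw [this]

theorem pvG_zero (crabs : List (Int × Int)) :
    pvG crabs 0 = (crabs.map (fun pc => pc.2 * pc.1)).sum := by
  unfold pvG
  rw [pvHsum_zero]
  ring

-- loop invariant for A's fold
theorem pvLoop (crabs : List (Int × Int))
    (hnd : (crabs.map Prod.fst).Nodup) (n : Nat) :
    (PySem.List.pyRange 0 (n : Int) 1).foldl (pvStepA crabs)
      (0, (crabs.map Prod.snd).sum, pvG crabs 0, [pvG crabs 0]) =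
    (pvLsum crabs n, (crabs.map Prod.snd).sum - pvLsum crabs n, pvG crabs n,
      [pvG crabs 0] ++ (PySem.List.pyRange 1 ((n : Int) + 1) 1).map (pvG crabs)) := by
  induction n with
  | zero =>
    simp only [Nat.cast_zero, zero_add, PySem.List.pyRange_one_eq_nil le_rfl,
      List.foldl_nil, List.map_nil, List.append_nil, pvLsum_zero]
    simp
  | succ n ih =>
    have hcast : ((n + 1 : Nat) : Int) = (n : Int) + 1 := by push_cast; ring
    have hn0 : (0 : Int) ≤ (n : Int) := by positivity
    rw [hcast, PySem.List.pyRange_one_succ_right hn0, List.foldl_append, ih]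
    simp only [List.foldl_cons, List.foldl_nil, pvStepA]
    rw [pvGetD_eq_msum crabs n hnd]
    have hl : pvLsum crabs n + pvMsum crabs n = pvLsum crabs ((n : Int) + 1) :=
      (pvLsum_succ crabs n hn0).symm
    have hr : (crabs.map Prod.snd).sum - pvLsum crabs n - pvMsum crabs n =
        (crabs.map Prod.snd).sum - pvLsum crabs ((n : Int) + 1) := by omega
    have hg : pvG crabs n + (pvLsum crabs n + pvMsum crabs n) -
        ((crabs.map Prod.snd).sum - pvLsum crabs n - pvMsum crabs n) =
        pvG crabs ((n : Int) + 1) := by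
      rw [hl]
      have h2 : (crabs.map Prod.snd).sum - pvLsum crabs n - pvMsum crabs n =
          (crabs.map Prod.snd).sum - pvLsum crabs ((n : Int) + 1) := hr
      rw [h2]
      unfold pvG
      rw [pvHsum_succ crabs n hn0]
      ring
    have hrange : PySem.List.pyRange 1 ((n : Int) + 1 + 1) 1 =
        PySem.List.pyRange 1 ((n : Int) + 1) 1 ++ [(n : Int) + 1] :=
      PySem.List.pyRange_one_succ_right (by omega)
    rw [hrange, List.map_append]
    simp only [Prod.mk.injEq, List.map_cons, List.map_nil]
    exact ⟨hl, hr, hg, by rw [hg]; simp⟩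

-- ===== VERDICT (by name: the statement is the Claim_ definition above) =====
theorem calc_fuel_spec : Claim_equal_calc_fuel := by
  intro crabs _ hpre
  obtain ⟨hne, hnd⟩ := hpre
  unfold Spec_calc_fuel calc_fuel calc_fuel_alt
  cases hmax : PySem.List.max? (crabs.map Prod.fst) (fun y => y) with
  | none =>
    exact absurd (by simpa using (PySem.List.max?_eq_none_iff _ _).mp hmax) hne
  | some mx =>
    simp only []
    have hmapB : (PySem.List.pyRange 1 (mx + 1 + 1) 1).map
        (pvFuelB crabs ((crabs.map (fun pc => pc.2 * pc.1)).sum) ((crabs.map Prod.snd).sum)) =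
        (PySem.List.pyRange 1 (mx + 1 + 1) 1).map (pvG crabs) :=
      List.map_congr_left (fun t _ => pvFuelB_eq_G crabs t)
    rw [hmapB, pvBase_eq crabs, ← pvG_zero crabs]
    by_cases hmx : 0 ≤ mx
    · have hn : (((mx + 1).toNat : Nat) : Int) = mx + 1 := Int.toNat_of_nonneg (by omega)
      rw [← hn, pvLoop crabs hnd ((mx + 1).toNat), hn]
    · rw [PySem.List.pyRange_one_eq_nil (show mx + 1 ≤ 0 by omega),
        PySem.List.pyRange_one_eq_nil (show mx + 1 + 1 ≤ 1 by omega)]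
      simp
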